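-- pv_equiv track=rewrite | github.com/dragneelfps/GoogleKickstart2020Solutions | roundA/python/Allocation.py | solve
-- ===== SOURCE A (Python) =====
-- def solve(n, costs, b):
--     costs.sort()
--     res = 0
--     for i in range(n):
--         if b >= costs[i]:
--             b -= costs[i]
--             res += 1
--     return res
-- ===== SOURCE B (Python) =====
-- def solve(n, costs, b):
--     costs.sort()
--     prefix = []
--     acc = 0
--     for i in range(n):
--         acc += costs[i]
--         prefix.append(acc)
--     res = 0
--     for s in prefix:
--         if s > b:
--             break
--         res += 1
--     return res
-- ===== Notes on version B (the rewrite author's own statement) =====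
-- stated objective: alternative
-- what changed: Replaces the running-subtraction-with-branch loop over a mutable budget by two phases: build the prefix-sum table of the first n sorted costs, then count its leading entries that fit in the budget (stop at the first overrun).
import Mathlib
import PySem

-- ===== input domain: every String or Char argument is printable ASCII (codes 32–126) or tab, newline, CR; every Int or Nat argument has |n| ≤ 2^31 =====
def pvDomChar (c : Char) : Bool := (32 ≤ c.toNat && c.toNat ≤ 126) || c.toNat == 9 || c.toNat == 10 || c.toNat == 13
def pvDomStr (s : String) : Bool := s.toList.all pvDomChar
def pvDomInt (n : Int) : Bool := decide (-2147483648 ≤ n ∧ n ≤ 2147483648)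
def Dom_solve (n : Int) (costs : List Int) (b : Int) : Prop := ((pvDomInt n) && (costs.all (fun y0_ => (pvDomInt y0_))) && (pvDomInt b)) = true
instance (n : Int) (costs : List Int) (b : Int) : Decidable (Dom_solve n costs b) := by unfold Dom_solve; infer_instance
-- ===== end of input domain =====

-- B replaces A's budget-mutating branch loop by a prefix-sum table plus a leading-count scan
-- (objective: alternative decomposition, same cost). Both Pythons sort `costs` in place; the
-- equivalence proved here is about the return value (both perform the identical mutation).

-- ===== PORT A =====
def solve (n : Int) (costs : List Int) (b : Int) : Int :=
  let cs := PySem.List.sorted costs (fun x => x) false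
  let st := (PySem.List.pyRange 0 n 1).foldl
    (fun (st : Int × Int) i =>
      let c := PySem.List.pyGetD cs i 0
      if st.1 ≥ c then (st.1 - c, st.2 + 1) else st) (b, 0)
  st.2

-- ===== PORT B =====
-- the `for s in prefix: if s > b: break; res += 1` loop of Source B
def countLe (ps : List Int) (b : Int) : Int :=
  match ps with
  | [] => 0
  | s :: rest => if s > b then 0 else countLe rest b + 1

def solve_alt (n : Int) (costs : List Int) (b : Int) : Int :=
  let cs := PySem.List.sorted costs (fun x => x) false
  let st := (PySem.List.pyRange 0 n 1).foldl
    (fun (st : Int × List Int) i =>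
      let acc := st.1 + PySem.List.pyGetD cs i 0
      (acc, st.2 ++ [acc])) (0, [])
  countLe st.2 b

-- ===== PRECONDITION & SPEC =====
-- A raises IndexError iff n > len(costs) (it reads costs[i] for every i in range(n)); exactly those inputs are excluded.
def Pre_solve (n : Int) (costs : List Int) (b : Int) : Prop := n ≤ (costs.length : Int)
instance (n : Int) (costs : List Int) (b : Int) : Decidable (Pre_solve n costs b) := by unfold Pre_solve; infer_instance
def pvWitness_solve : Int × List Int × Int := (3, [20, 3, 5, 10], 100)

def Spec_solve (n : Int) (costs : List Int) (b : Int) (out : Int) : Prop := out = solve_alt n costs b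
instance (n : Int) (costs : List Int) (b : Int) (out : Int) : Decidable (Spec_solve n costs b out) := by unfold Spec_solve; infer_instance

-- ===== CLAIM (what is proved, stated in full; the proofs are below) =====
def Claim_equal_solve : Prop := ∀ (n : Int) (costs : List Int) (b : Int), Dom_solve n costs b → Pre_solve n costs b → Spec_solve n costs b (solve n costs b)

-- ===== LEMMAS AND PROOFS =====

-- A's loop as structural recursion over the list of accessed costs
def buy (l : List Int) (b : Int) : Int :=
  match l with
  | [] => 0
  | c :: t => if b ≥ c then 1 + buy t (b - c) else buy t b

-- B's prefix-sum table over the list of accessed costs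
def prefixes (a : Int) (l : List Int) : List Int :=
  match l with
  | [] => []
  | c :: t => (a + c) :: prefixes (a + c) t

theorem buy_zero_of_lt (l : List Int) (b : Int) (h : ∀ x ∈ l, b < x) : buy l b = 0 := by
  induction l with
  | nil => rfl
  | cons c t ih =>
    have hc := h c (by simp)
    simp only [buy, if_neg (by omega : ¬ b ≥ c)]
    exact ih (fun x hx => h x (by simp [hx]))

theorem countLe_prefixes (l : List Int) (hl : l.Pairwise (· ≤ ·)) :
    ∀ a b, countLe (prefixes a l) b = buy l (b - a) := by
  induction l with
  | nil => intro a b; rfl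
  | cons c t ih =>
    intro a b
    rcases List.pairwise_cons.mp hl with ⟨hc, ht⟩
    by_cases h : a + c > b
    · simp only [prefixes, countLe, if_pos h, buy, if_neg (by omega : ¬ b - a ≥ c)]
      exact (buy_zero_of_lt t (b - a) (fun x hx => by have := hc x hx; omega)).symm
    · simp only [prefixes, countLe, if_neg h, buy, if_pos (by omega : b - a ≥ c), ih ht]
      have : b - a - c = b - (a + c) := by ring
      rw [this]; ring

theorem foldA_snd (l : List Int) : ∀ b r,
    (l.foldl (fun (st : Int × Int) c => if st.1 ≥ c then (st.1 - c, st.2 + 1) else st) (b, r)).2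
      = r + buy l b := by
  induction l with
  | nil => intro b r; simp [buy]
  | cons c t ih =>
    intro b r
    by_cases h : b ≥ c
    · simp only [List.foldl_cons, ih, buy, if_pos h]; ring
    · simp only [List.foldl_cons, ih, buy, if_neg h]

theorem foldB_eq (l : List Int) : ∀ a p,
    l.foldl (fun (st : Int × List Int) c => (st.1 + c, st.2 ++ [st.1 + c])) (a, p)
      = (a + l.sum, p ++ prefixes a l) := by
  induction l with
  | nil => intro a p; simp [prefixes]
  | cons c t ih =>
    intro a p
    simp only [List.foldl_cons, ih, prefixes, List.sum_cons, List.append_assoc,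
      List.singleton_append]
    rw [add_assoc]

-- the pyRange fold over indices equals a fold over the first n.toNat sorted costs
theorem foldl_pyRange_take {σ : Type} (cs : List Int) (f : σ → Int → σ) (init : σ)
    (n : Int) (hn : n ≤ (cs.length : Int)) :
    (PySem.List.pyRange 0 n 1).foldl (fun st i => f st (PySem.List.pyGetD cs i 0)) init
      = (cs.take n.toNat).foldl f init := by
  by_cases h0 : n ≤ 0
  · rw [PySem.List.pyRange_one_eq_nil h0]
    have : n.toNat = 0 := by omega
    simp [this]
  · have hlen : PySem.List.len (cs.take n.toNat) = n := by
      simp only [PySem.List.len, List.length_take]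
      omega
    have := PySem.List.foldl_pyRange_zero_pyGetD (cs.take n.toNat) 0 f init
    rw [hlen] at this
    rw [← this]
    apply PySem.List.foldl_congr_mem
    intro st i hi
    rcases (PySem.List.mem_pyRange_one).mp hi with ⟨h1, h2⟩
    have hlt : i.toNat < n.toNat := by omega
    rw [PySem.List.pyGetD_eq_getElem cs 0 h1 (by omega),
        PySem.List.pyGetD_eq_getElem (cs.take n.toNat) 0 h1 (by simp; omega)]
    rw [List.getElem_take]

-- ===== VERDICT (by name: the statement is the Claim_ definition above) =====
theorem solve_spec : Claim_equal_solve := by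
  intro n costs b _ hpre
  simp only [Spec_solve, solve, solve_alt]
  set cs := PySem.List.sorted costs (fun x => x) false with hcs
  have hlen : n ≤ (cs.length : Int) := by
    rw [hcs, PySem.List.length_sorted]; exact hpre
  rw [foldl_pyRange_take cs (fun (st : Int × Int) c => if st.1 ≥ c then (st.1 - c, st.2 + 1) else st) (b, 0) n hlen,
      foldl_pyRange_take cs (fun (st : Int × List Int) c => (st.1 + c, st.2 ++ [st.1 + c])) (0, []) n hlen]
  rw [foldA_snd, foldB_eq]
  simp only [List.nil_append]
  have hpw : (cs.take n.toNat).Pairwise (· ≤ ·) := by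
    have := PySem.List.sorted_pairwise costs (fun x => x) (κ := Int)
    exact List.Pairwise.sublist (List.take_sublist _ _) (hcs ▸ this)
  rw [countLe_prefixes _ hpw 0 b, sub_zero, zero_add]
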